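-- pv_equiv track=rewrite | github.com/jed1337/Kattis | geppetto.py | solve
-- ===== SOURCE A (Python) =====
-- def solve(current, invalid_combinations, chosen):
--     if current == 0:
--         return 1
--
--     total_ways = 0
--
--     current_is_valid = True
--     for value in invalid_combinations[current]:
--         if value in chosen:
--             current_is_valid = False
--
--     # exclude current item
--     total_ways += solve(current - 1, invalid_combinations, chosen)
--
--     # include current item
--     if current_is_valid:
--         total_ways += solve(current - 1, invalid_combinations, chosen + [current])
--
--     return total_ways
-- ===== SOURCE B (Python) =====
-- def solve(current, invalid_combinations, chosen):
--     count = 0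
--     for mask in range(2 ** current):
--         running = list(chosen)
--         ok = True
--         for j in range(current, 0, -1):
--             if (mask >> (j - 1)) & 1:
--                 if any(v in running for v in invalid_combinations[j]):
--                     ok = False
--                     break
--                 running.append(j)
--         if ok:
--             count += 1
--     return count
-- ===== Notes on version B (the rewrite author's own statement) =====
-- stated objective: alternative
-- what changed: Replaces the branching exclude/include tree recursion with a flat iterative enumeration of all 2^current bitmasks, validating each candidate subset by a single high-to-low scan that grows a running chosen set.
import Mathlib
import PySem

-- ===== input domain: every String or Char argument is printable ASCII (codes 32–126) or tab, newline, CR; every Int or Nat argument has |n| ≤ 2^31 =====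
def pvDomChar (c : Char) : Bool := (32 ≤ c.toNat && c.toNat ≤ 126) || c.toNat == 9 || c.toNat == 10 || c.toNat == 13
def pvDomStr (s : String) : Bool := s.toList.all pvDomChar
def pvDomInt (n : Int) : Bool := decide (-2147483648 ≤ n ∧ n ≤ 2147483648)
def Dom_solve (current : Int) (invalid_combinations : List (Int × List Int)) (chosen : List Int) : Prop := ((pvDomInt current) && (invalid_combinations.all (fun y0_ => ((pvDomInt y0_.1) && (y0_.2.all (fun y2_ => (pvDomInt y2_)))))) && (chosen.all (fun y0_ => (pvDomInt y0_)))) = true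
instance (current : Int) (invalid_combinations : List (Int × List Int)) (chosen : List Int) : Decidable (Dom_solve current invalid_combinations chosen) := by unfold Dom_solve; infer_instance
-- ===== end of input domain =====

-- B replaces A's exclude/include tree recursion by a flat enumeration of all 2^current
-- bitmasks, each validated by one high-to-low scan; same return value on Pre_ (alternative
-- decomposition, no speed claim).

-- dict[int, list[int]] as an association list; lookup = first match (the type convention).
def dictGet (d : List (Int × List Int)) (k : Int) : Option (List Int) :=
  match d with
  | [] => none
  | (k', v) :: rest => if k' = k then some v else dictGet rest k

-- ===== PORT A =====
-- The recursion descends on current; ported on current.toNat (faithful for current ≥ 0,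
-- which Pre_solve requires: Python diverges for negative current).  The KeyError of
-- invalid_combinations[current] is excluded by Pre_solve, so getD [] is only a totaliser.
def solveA : Nat → List (Int × List Int) → List Int → Int
  | 0, _, _ => 1
  | n + 1, inv, chosen =>
    let vals := (dictGet inv ((n : Int) + 1)).getD []
    let currentIsValid := vals.foldl (fun b v => if chosen.contains v then false else b) true
    let totalWays := solveA n inv chosen
    totalWays + (if currentIsValid then solveA n inv (chosen ++ [(n : Int) + 1]) else 0)

def solve (current : Int) (invalid_combinations : List (Int × List Int)) (chosen : List Int) : Int :=
  solveA current.toNat invalid_combinations chosen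

-- ===== PORT B =====
-- the inner scan: j runs current, current-1, …, 1 (bit j-1 of mask = item j selected);
-- `running` accumulates the selected higher items on top of the initial chosen list.
def scanB (inv : List (Int × List Int)) : Nat → Nat → List Int → Bool
  | 0, _, _ => true
  | j + 1, mask, running =>
    if mask.testBit j then
      if ((dictGet inv ((j : Int) + 1)).getD []).any (fun v => running.contains v) then false
      else scanB inv j mask (running ++ [(j : Int) + 1])
    else scanB inv j mask running

def solve_alt (current : Int) (invalid_combinations : List (Int × List Int)) (chosen : List Int) : Int :=
  (List.range (2 ^ current.toNat)).foldl
    (fun c m => if scanB invalid_combinations current.toNat m chosen then c + 1 else c) 0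

-- ===== PRECONDITION & SPEC =====
-- Pre_ excludes current < 0 (Python A recurses forever) and missing dict keys 1..current
-- (Python A raises KeyError); it admits exactly the inputs on which A returns.
-- (stated as key membership: every key 1..current occurs in the association list;
-- the length bound is implied by that membership and only keeps the check small)
def Pre_solve (current : Int) (invalid_combinations : List (Int × List Int)) (chosen : List Int) : Prop :=
  0 ≤ current ∧ current ≤ (invalid_combinations.length : Int) ∧
    (List.range current.toNat).all (fun i => invalid_combinations.any (fun p => p.1 == (i : Int) + 1)) = true

instance (current : Int) (invalid_combinations : List (Int × List Int)) (chosen : List Int) : Decidable (Pre_solve current invalid_combinations chosen) := by unfold Pre_solve; infer_instance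

def pvWitness_solve : Int × (List (Int × List Int)) × List Int := (2, [(1, [2]), (2, [])], [])

def Spec_solve (current : Int) (invalid_combinations : List (Int × List Int)) (chosen : List Int) (out : Int) : Prop := out = solve_alt current invalid_combinations chosen
instance (current : Int) (invalid_combinations : List (Int × List Int)) (chosen : List Int) (out : Int) : Decidable (Spec_solve current invalid_combinations chosen out) := by unfold Spec_solve; infer_instance

-- ===== CLAIM (what is proved, stated in full; the proofs are below) =====
def Claim_equal_solve : Prop := ∀ (current : Int) (invalid_combinations : List (Int × List Int)) (chosen : List Int), Dom_solve current invalid_combinations chosen → Pre_solve current invalid_combinations chosen → Spec_solve current invalid_combinations chosen (solve current invalid_combinations chosen)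

-- ===== LEMMAS AND PROOFS =====

-- A's validity loop computes "no forbidden value is in chosen".
theorem foldl_valid (chosen : List Int) (vals : List Int) (b : Bool) :
    vals.foldl (fun b v => if chosen.contains v then false else b) b
      = (b && !(vals.any (fun v => chosen.contains v))) := by
  induction vals generalizing b with
  | nil => simp
  | cons x xs ih =>
    simp only [List.foldl_cons, List.any_cons, ih]
    cases b <;> by_cases h : chosen.contains x <;> simp [h]

-- scanB only looks at bits below j.
theorem scanB_congr (inv : List (Int × List Int)) (j : Nat) (m1 m2 : Nat)
    (h : ∀ i, i < j → m1.testBit i = m2.testBit i) (running : List Int) :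
    scanB inv j m1 running = scanB inv j m2 running := by
  induction j generalizing running with
  | zero => rfl
  | succ j ih =>
    simp only [scanB, h j (Nat.lt_succ_self j)]
    split
    · split
      · rfl
      · exact ih (fun i hi => h i (Nat.lt_succ_of_lt hi)) _
    · exact ih (fun i hi => h i (Nat.lt_succ_of_lt hi)) _

-- B's counting loop is a countP.
theorem foldl_count (p : Nat → Bool) (l : List Nat) (c : Int) :
    l.foldl (fun c m => if p m then c + 1 else c) c = c + (l.countP p : Int) := by
  induction l generalizing c with
  | nil => simp
  | cons x xs ih =>
    by_cases h : p x <;> simp [h, ih] <;> ring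

-- The core invariant: the tree recursion counts exactly the masks that pass the scan.
theorem solveA_eq_count (n : Nat) (inv : List (Int × List Int)) (chosen : List Int) :
    solveA n inv chosen = ((List.range (2 ^ n)).countP (fun m => scanB inv n m chosen) : Int) := by
  induction n generalizing chosen with
  | zero => simp [solveA, scanB]
  | succ n ih =>
    have hsplit : (2 : Nat) ^ (n + 1) = 2 ^ n + 2 ^ n := by ring
    rw [hsplit, List.range_add]
    rw [List.countP_append, List.countP_map]
    have hlow : (List.range (2 ^ n)).countP (fun m => scanB inv (n + 1) m chosen)
        = (List.range (2 ^ n)).countP (fun m => scanB inv n m chosen) := by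
      apply List.countP_congr
      intro m hm
      have hmlt : m < 2 ^ n := List.mem_range.mp hm
      have hbit : m.testBit n = false := Nat.testBit_lt_two_pow hmlt
      simp only [scanB, hbit, if_false, Bool.false_eq_true]
    have hhigh : (List.range (2 ^ n)).countP
          ((fun m => scanB inv (n + 1) m chosen) ∘ (fun m => 2 ^ n + m))
        = (List.range (2 ^ n)).countP (fun m =>
            if ((dictGet inv ((n : Int) + 1)).getD []).any (fun v => chosen.contains v) then false
            else scanB inv n m (chosen ++ [(n : Int) + 1])) := by
      apply List.countP_congr
      intro m hm
      have hmlt : m < 2 ^ n := List.mem_range.mp hm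
      have hbitn : (2 ^ n + m).testBit n = true := by
        rw [Nat.testBit_two_pow_add_eq, Nat.testBit_lt_two_pow hmlt]
        rfl
      have hlowbits : ∀ i, i < n → (2 ^ n + m).testBit i = m.testBit i := by
        intro i hi
        exact Nat.testBit_two_pow_add_gt hi m
      simp only [Function.comp, scanB, hbitn, if_true]
      split
      · rfl
      · rw [scanB_congr inv n (2 ^ n + m) m hlowbits]
    rw [hlow, hhigh]
    simp only [solveA]
    rw [foldl_valid, Bool.true_and]
    by_cases hval : ((dictGet inv ((n : Int) + 1)).getD []).any (fun v => chosen.contains v) = true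
    · rw [hval]
      simp only [Bool.not_true, Bool.false_eq_true, if_false, if_true]
      rw [ih]
      simp
    · rw [Bool.not_eq_true] at hval
      rw [hval]
      simp only [Bool.not_false, if_true, Bool.false_eq_true, if_false]
      rw [ih, ih]
      push_cast
      ring

-- ===== VERDICT (by name: the statement is the Claim_ definition above) =====
theorem solve_spec : Claim_equal_solve := by
  intro current inv chosen _ _
  unfold Spec_solve solve solve_alt
  rw [foldl_count]
  rw [solveA_eq_count]
  simp
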